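-- pv_equiv track=rewrite | github.com/fjelltopp/meerkat_api | meerkat_api/test/test_reports.py | compare_unhashable_list
-- ===== SOURCE A (Python) =====
-- def compare_unhashable_list(s, t):
--     t = list(t)   # make a mutable copy
--     try:
--         for elem in s:
--             t.remove(elem)
--     except ValueError:
--         return False
--     return not t
-- ===== SOURCE B (Python) =====
-- def compare_unhashable_list(s, t):
--     s = list(s)
--     t = list(t)
--     if len(s) != len(t):
--         return False
--     seen = []
--     for elem in s:
--         if elem in seen:
--             continue
--         if s.count(elem) != t.count(elem):
--             return False
--         seen.append(elem)
--     return True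
-- ===== Notes on version B (the rewrite author's own statement) =====
-- stated objective: simpler
-- what changed: Replaced destructive one-by-one removal with try/except by a length check plus occurrence counting (s.count vs t.count) over the distinct elements (a seen list skips repeats), with no mutable shrinking copy and no exception-based control flow.
import Mathlib
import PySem

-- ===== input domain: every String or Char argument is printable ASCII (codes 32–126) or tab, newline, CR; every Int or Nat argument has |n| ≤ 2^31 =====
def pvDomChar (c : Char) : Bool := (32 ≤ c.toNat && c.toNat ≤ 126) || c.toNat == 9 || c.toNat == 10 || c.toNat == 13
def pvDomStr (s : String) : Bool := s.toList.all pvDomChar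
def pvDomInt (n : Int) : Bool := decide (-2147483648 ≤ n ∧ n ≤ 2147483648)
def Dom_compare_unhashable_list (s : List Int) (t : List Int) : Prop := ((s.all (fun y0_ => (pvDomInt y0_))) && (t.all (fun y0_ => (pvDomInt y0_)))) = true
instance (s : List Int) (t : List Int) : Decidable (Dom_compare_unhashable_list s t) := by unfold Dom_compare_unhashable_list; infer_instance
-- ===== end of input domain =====

-- B replaces A's destructive remove-with-try/except loop by a length check plus occurrence counting over the distinct elements; objective: simpler control flow (no mutation, no exception).

-- ===== PORT A =====
-- the for-loop over s with the mutable copy of t; ValueError (remove? = none) → short-circuit false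
def pvLoopA : List Int → List Int → Bool
  | [], t => t.isEmpty          -- 'return not t'
  | x :: xs, t =>
    match PySem.List.remove? t x with
    | none => false             -- t.remove(elem) raised ValueError
    | some t' => pvLoopA xs t'

def compare_unhashable_list (s : List Int) (t : List Int) : Bool := pvLoopA s t

-- ===== PORT B =====
-- the for-loop over s with the 'seen' list of already-checked elements
def pvLoopB (s t : List Int) : List Int → List Int → Bool
  | [], _ => true
  | elem :: rest, seen =>
    if elem ∈ seen then pvLoopB s t rest seen
    else if PySem.List.count s elem ≠ PySem.List.count t elem then false
    else pvLoopB s t rest (seen ++ [elem])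

def compare_unhashable_list_alt (s : List Int) (t : List Int) : Bool :=
  if s.length ≠ t.length then false
  else pvLoopB s t s []

-- ===== PRECONDITION & SPEC =====
def Spec_compare_unhashable_list (s : List Int) (t : List Int) (out : Bool) : Prop := out = compare_unhashable_list_alt s t
instance (s : List Int) (t : List Int) (out : Bool) : Decidable (Spec_compare_unhashable_list s t out) := by unfold Spec_compare_unhashable_list; infer_instance

-- ===== CLAIM (what is proved, stated in full; the proofs are below) =====
def Claim_equal_compare_unhashable_list : Prop := ∀ (s : List Int) (t : List Int), Dom_compare_unhashable_list s t → Spec_compare_unhashable_list s t (compare_unhashable_list s t)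

-- ===== LEMMAS AND PROOFS =====

-- A's result characterised: true iff s and t are equal as multisets
theorem pvLoopA_iff (s t : List Int) :
    pvLoopA s t = true ↔ (s : Multiset Int) = (t : Multiset Int) := by
  induction s generalizing t with
  | nil =>
    simp [pvLoopA, List.isEmpty_iff]
    constructor
    · rintro rfl; rfl
    · intro h; exact by simpa using (Multiset.coe_eq_zero (l := t)).mp h.symm
  | cons x xs ih =>
    by_cases hx : x ∈ t
    · rw [pvLoopA, PySem.List.remove?_eq_some_erase t x hx]
      simp only [ih, Multiset.coe_eq_coe]
      rw [List.cons_perm_iff_perm_erase]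
      simp [hx]
    · rw [pvLoopA, (PySem.List.remove?_eq_none_iff t x).mpr hx]
      simp only [Bool.false_eq_true, false_iff, Multiset.coe_eq_coe]
      intro h
      exact hx (h.mem_iff.mp (List.mem_cons_self ..))

-- B's loop with the seen-skip equals the plain count check over the remaining elements
theorem pvLoopB_eq (s t : List Int) (rest seen : List Int)
    (hseen : ∀ e ∈ seen, PySem.List.count s e = PySem.List.count t e) :
    pvLoopB s t rest seen
      = rest.all (fun e => PySem.List.count s e == PySem.List.count t e) := by
  induction rest generalizing seen with
  | nil => simp [pvLoopB]
  | cons e rest ih =>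
    rw [pvLoopB]
    simp only [PySem.List.count] at hseen ⊢
    by_cases he : e ∈ seen
    · simp [he, ih seen (by simpa [PySem.List.count] using hseen), hseen e he]
    · by_cases hc : List.count e s = List.count e t
      · have hall : ∀ x ∈ seen ++ [e], PySem.List.count s x = PySem.List.count t x := by
          intro x hx
          rcases List.mem_append.mp hx with h | h
          · simpa [PySem.List.count] using hseen x h
          · simpa [PySem.List.count, List.mem_singleton.mp h] using hc
        simp [he, hc, ih (seen ++ [e]) hall, PySem.List.count]
      · simp [he, hc, PySem.List.count]

-- B's result characterised: true iff s and t are equal as multisets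
theorem pvAltB_iff (s t : List Int) :
    compare_unhashable_list_alt s t = true ↔ (s : Multiset Int) = (t : Multiset Int) := by
  unfold compare_unhashable_list_alt
  split_ifs with hlen
  · simp only [Bool.false_eq_true, false_iff]
    intro h
    exact hlen (by simpa using congrArg Multiset.card h)
  · rw [not_ne_iff] at hlen
    rw [pvLoopB_eq s t s [] (by simp)]
    simp only [List.all_eq_true, beq_iff_eq, PySem.List.count]
    constructor
    · intro h
      -- s ≤ t as multisets (count-wise), equal card ⇒ equal
      have hle : (s : Multiset Int) ≤ (t : Multiset Int) := by
        rw [Multiset.le_iff_count]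
        intro a
        by_cases ha : a ∈ s
        · simpa [Multiset.coe_count] using (h a ha).le
        · simp [Multiset.coe_count, List.count_eq_zero_of_not_mem ha]
      exact Multiset.eq_of_le_of_card_le hle (by simpa using hlen.ge)
    · intro h a _
      have := congrArg (Multiset.count a) h
      simpa [Multiset.coe_count] using this

-- ===== VERDICT (by name: the statement is the Claim_ definition above) =====
theorem compare_unhashable_list_spec : Claim_equal_compare_unhashable_list := by
  intro s t _
  unfold Spec_compare_unhashable_list
  rcases hb : compare_unhashable_list_alt s t with _ | _
  · rcases ha : compare_unhashable_list s t with _ | _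
    · rfl
    · exact absurd ((pvAltB_iff s t).mpr ((pvLoopA_iff s t).mp ha)) (by simp [hb])
  · exact (pvLoopA_iff s t).mpr ((pvAltB_iff s t).mp hb)
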